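-- pv_equiv track=rewrite | github.com/WocherZ/Project-Alice | getting_timetable.py | start_time
-- ===== SOURCE A (Python) =====
-- def delete_zeros(str_number):
--     t = []
--     check = False
--     for i in str_number:
--         if i != "0":
--             check = True
--         if check:
--             t.append(i)
--     if len(t) == 0:
--         return "0"
--     else:
--         return "".join(t)
--
-- def split_time(time_str):
--     t1 = []
--     t2 = []
--     check = True
--     for i in time_str:
--         if i == ":":
--             check = False
--         elif check:
--             t1.append(i)
--         elif check is False:
--             t2.append(i)
--     return [delete_zeros("".join(t1)), delete_zeros("".join(t2))]
--
-- def start_time(time_str):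
--     t = []
--     check = True
--     for i in time_str:
--         if i == " " or i == "-":
--             check = False
--         elif check:
--             t.append(i)
--         elif check is False:
--             break
--     return split_time("".join(t))
-- ===== SOURCE B (Python) =====
-- def start_time(time_str):
--     head = time_str.split(' ', 1)[0].split('-', 1)[0]
--     parts = head.split(':')
--     hour = parts[0].lstrip('0')
--     minute = ''.join(parts[1:]).lstrip('0')
--     return [hour or '0', minute or '0']
-- ===== Notes on version B (the rewrite author's own statement) =====
-- stated objective: idiomatic
-- what changed: A's three manual character-accumulation loops with boolean flags are replaced by built-in string methods: a maxsplit-1 split on space and on dash to take the leading token, a colon split whose first part is the hour and whose remaining parts are joined (discarding later colons, as A does), and a left strip of zero digits with a single zero digit as fallback instead of the delete_zeros loop.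
import Mathlib
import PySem

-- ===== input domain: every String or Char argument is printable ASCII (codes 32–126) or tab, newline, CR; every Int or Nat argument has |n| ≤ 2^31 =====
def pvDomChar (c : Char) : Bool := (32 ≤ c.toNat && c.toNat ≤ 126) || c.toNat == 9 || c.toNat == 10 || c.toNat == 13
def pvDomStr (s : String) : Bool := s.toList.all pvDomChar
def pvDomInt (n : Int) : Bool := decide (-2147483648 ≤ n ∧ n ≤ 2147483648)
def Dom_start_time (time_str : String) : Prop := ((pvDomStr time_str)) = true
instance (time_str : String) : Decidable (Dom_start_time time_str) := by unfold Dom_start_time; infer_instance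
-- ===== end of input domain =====

-- B replaces A's three character-accumulation loops by string methods (split with maxsplit, split on ':', lstrip('0')); objective: idiomatic.

-- ===== PORT A =====
-- delete_zeros: loop accumulating t with a 'check' flag
def pyDzStep (acc : List Char × Bool) (i : Char) : List Char × Bool :=
  let check := if i ≠ '0' then true else acc.2
  ((if check then acc.1 ++ [i] else acc.1), check)

def pyDeleteZeros (s : List Char) : List Char :=
  let r := s.foldl pyDzStep ([], false)
  if r.1.length = 0 then ['0'] else r.1

-- split_time: loop over chars with flag 'check', t1 before the first ':', t2 after (colons skipped)
def pyStStep (acc : List Char × List Char × Bool) (i : Char) : List Char × List Char × Bool :=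
  if i = ':' then (acc.1, acc.2.1, false)
  else if acc.2.2 then (acc.1 ++ [i], acc.2.1, acc.2.2)
  else (acc.1, acc.2.1 ++ [i], acc.2.2)

def pySplitTime (s : List Char) : List String :=
  let r := s.foldl pyStStep ([], [], true)
  [String.mk (pyDeleteZeros r.1), String.mk (pyDeleteZeros r.2.1)]

-- start_time's loop: appends while check, 'break' (stop and return t) once check is False and a
-- non-space/dash char is met
def pyStartLoop : List Char → List Char → Bool → List Char
  | [], t, _ => t
  | i :: rest, t, check =>
    if i = ' ' ∨ i = '-' then pyStartLoop rest t false
    else if check then pyStartLoop rest (t ++ [i]) check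
    else t

def start_time (time_str : String) : List String :=
  pySplitTime (pyStartLoop time_str.toList [] true)

-- ===== PORT B =====
-- str.split(sep, 1) always returns a nonempty list, so Python's [0] is its head (headD never
-- sees its default); lstrip('0') on chars is dropWhile (== '0'); ''.join = PySem.Chars.join []
def start_time_alt (time_str : String) : List String :=
  let head1 := (PySem.Chars.splitOnMax time_str.toList [' '] 1).headD []
  let head := (PySem.Chars.splitOnMax head1 ['-'] 1).headD []
  let parts := PySem.Chars.splitOn head [':']
  let hour := (parts.headD []).dropWhile (· == '0')
  let minute := (PySem.Chars.join [] (parts.drop 1)).dropWhile (· == '0')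
  [String.mk (if hour.isEmpty then ['0'] else hour),
   String.mk (if minute.isEmpty then ['0'] else minute)]

-- ===== PRECONDITION & SPEC =====
def Spec_start_time (time_str : String) (out : List String) : Prop := out = start_time_alt time_str
instance (time_str : String) (out : List String) : Decidable (Spec_start_time time_str out) := by unfold Spec_start_time; infer_instance

-- ===== CLAIM (what is proved, stated in full; the proofs are below) =====
def Claim_equal_start_time : Prop := ∀ (time_str : String), Dom_start_time time_str → Spec_start_time time_str (start_time time_str)

-- ===== LEMMAS AND PROOFS =====

-- the pieces of splitOn [c] after the first one, structurally
def tailPieces (c : Char) : List Char → List (List Char)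
  | [] => []
  | x :: xs => if x = c then xs.takeWhile (· != c) :: tailPieces c xs else tailPieces c xs

-- B side: splitOnMax.go with maxsplit exhausted returns the rest as one piece
theorem goMax_zero (c : Char) (fuel : Nat) (l : List Char) (acc : List (List Char)) :
    PySem.Chars.splitOnMax.go [c] fuel 0 l [] acc = acc.reverse ++ [l] := by
  cases fuel with
  | zero => simp [PySem.Chars.splitOnMax.go]
  | succ n => cases l <;> simp [PySem.Chars.splitOnMax.go]

theorem goMax_one (c : Char) : ∀ (l : List Char) (fuel : Nat), l.length < fuel →
    ∀ (cur : List Char) (acc : List (List Char)),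
    PySem.Chars.splitOnMax.go [c] fuel 1 l cur acc =
      acc.reverse ++ (cur.reverse ++ l.takeWhile (· != c)) ::
        (if c ∈ l then [(l.dropWhile (· != c)).drop 1] else []) := by
  intro l
  induction l with
  | nil =>
    intro fuel h cur acc
    cases fuel with
    | zero => omega
    | succ n => simp [PySem.Chars.splitOnMax.go]
  | cons x xs ih =>
    intro fuel h cur acc
    cases fuel with
    | zero => omega
    | succ n =>
      by_cases hx : x = c
      · subst hx
        simp [PySem.Chars.splitOnMax.go, List.isPrefixOf, goMax_zero]
      · have hne : ¬ ([c].isPrefixOf (x :: xs)) := by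
          simp [List.isPrefixOf]; intro hc; exact hx hc.symm
        have hcx : ¬ c = x := fun h' => hx h'.symm
        simp only [PySem.Chars.splitOnMax.go, hne, if_neg (by omega : ¬ (1 : Nat) = 0)]
        rw [ih n (by simpa using Nat.lt_of_succ_lt_succ h) (x :: cur) acc]
        have hxc : (x != c) = true := by simp [hx]
        simp [List.takeWhile_cons, List.dropWhile_cons, hxc, hx, hcx]

theorem splitOnMax_head (c : Char) (l : List Char) :
    (PySem.Chars.splitOnMax l [c] 1).headD [] = l.takeWhile (· != c) := by
  unfold PySem.Chars.splitOnMax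
  rw [if_neg (by omega : ¬ (1 : Int) < 0), show ((1 : Int).toNat) = 1 from rfl]
  rw [goMax_one c l (l.length + 1) (by omega) [] []]
  split <;> simp

-- B side: splitOn [c] = first piece :: tailPieces
theorem goSplit (c : Char) : ∀ (l : List Char) (fuel : Nat), l.length < fuel →
    ∀ (cur : List Char) (acc : List (List Char)),
    PySem.Chars.splitOn.go [c] fuel l cur acc =
      acc.reverse ++ (cur.reverse ++ l.takeWhile (· != c)) :: tailPieces c l := by
  intro l
  induction l with
  | nil =>
    intro fuel h cur acc
    cases fuel with
    | zero => omega
    | succ n => simp [PySem.Chars.splitOn.go, tailPieces]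
  | cons x xs ih =>
    intro fuel h cur acc
    cases fuel with
    | zero => omega
    | succ n =>
      by_cases hx : x = c
      · subst hx
        simp only [PySem.Chars.splitOn.go, List.isPrefixOf, BEq.rfl, Bool.true_and,
          List.isPrefixOf_nil_left, if_true]
        have hd : List.drop [x].length (x :: xs) = xs := rfl
        rw [hd, ih n (by simpa using Nat.lt_of_succ_lt_succ h) [] (cur.reverse :: acc)]
        simp [tailPieces]
      · have hne : ¬ ([c].isPrefixOf (x :: xs)) := by
          simp [List.isPrefixOf]; intro hc; exact hx hc.symm
        simp only [PySem.Chars.splitOn.go, hne, if_false]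
        rw [ih n (by simpa using Nat.lt_of_succ_lt_succ h) (x :: cur) acc]
        have hxc : (x != c) = true := by simp [hx]
        simp [List.takeWhile_cons, tailPieces, hxc, hx]

theorem splitOn_eq (c : Char) (l : List Char) :
    PySem.Chars.splitOn l [c] = l.takeWhile (· != c) :: tailPieces c l := by
  unfold PySem.Chars.splitOn
  rw [goSplit c l (l.length + 1) (by omega) [] []]
  simp

-- filter over a list = takeWhile ++ filter of what follows the first failing element
theorem filter_decomp (c : Char) : ∀ (l : List Char),
    l.filter (· != c) = l.takeWhile (· != c) ++ ((l.dropWhile (· != c)).drop 1).filter (· != c) := by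
  intro l
  induction l with
  | nil => simp
  | cons x xs ih =>
    by_cases hx : x = c
    · subst hx; simp
    · have hxc : (x != c) = true := by simp [hx]
      simp [List.filter_cons, List.takeWhile_cons, List.dropWhile_cons, hxc, ih]

theorem flatten_tailPieces (c : Char) : ∀ (l : List Char),
    (tailPieces c l).flatten = ((l.dropWhile (· != c)).drop 1).filter (· != c) := by
  intro l
  induction l with
  | nil => simp [tailPieces]
  | cons x xs ih =>
    by_cases hx : x = c
    · subst hx
      simp only [tailPieces, eq_self_iff_true, if_true, List.flatten_cons, ih,
        List.dropWhile_cons, bne_self_eq_false, Bool.false_eq_true, if_false,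
        List.drop_succ_cons, List.drop_zero]
      exact (filter_decomp x xs).symm
    · have hxc : (x != c) = true := by simp [hx]
      simp [tailPieces, List.dropWhile_cons, hxc, hx, ih]

theorem flatten_intersperse_nil (parts : List (List Char)) :
    (List.intersperse ([] : List Char) parts).flatten = parts.flatten := by
  induction parts with
  | nil => simp
  | cons p ps ih =>
    cases ps with
    | nil => simp
    | cons q qs => simp only [List.intersperse_cons₂, List.flatten_cons] at *; simp [ih]

theorem join_nil_eq_flatten (parts : List (List Char)) :
    PySem.Chars.join [] parts = parts.flatten := by
  simp [PySem.Chars.join, List.intercalate, flatten_intersperse_nil]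

-- A side: the start_time loop
theorem startLoop_false : ∀ (l t : List Char), pyStartLoop l t false = t := by
  intro l
  induction l with
  | nil => intro t; rfl
  | cons i rest ih =>
    intro t
    by_cases hi : i = ' ' ∨ i = '-'
    · simp [pyStartLoop, hi, ih]
    · simp [pyStartLoop, hi]

theorem startLoop_true : ∀ (l t : List Char),
    pyStartLoop l t true = t ++ l.takeWhile (fun ch => !(ch == ' ' || ch == '-')) := by
  intro l
  induction l with
  | nil => intro t; simp [pyStartLoop]
  | cons i rest ih =>
    intro t
    by_cases hi : i = ' ' ∨ i = '-'
    · rcases hi with h | h <;> subst h <;>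
        simp [pyStartLoop, startLoop_false, List.takeWhile_cons]
    · have h1 : ¬ i = ' ' := fun h => hi (Or.inl h)
      have h2 : ¬ i = '-' := fun h => hi (Or.inr h)
      simp [pyStartLoop, h1, h2, List.takeWhile_cons, ih]

-- A side: delete_zeros' fold strips the leading zeros
theorem dzFold_true : ∀ (l t : List Char),
    l.foldl pyDzStep (t, true) = (t ++ l, true) := by
  intro l
  induction l with
  | nil => intro t; simp
  | cons i rest ih =>
    intro t
    have hs : pyDzStep (t, true) i = (t ++ [i], true) := by
      by_cases hi : i = '0' <;> simp [pyDzStep, hi]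
    rw [List.foldl_cons, hs, ih (t ++ [i])]
    simp

theorem dzFold_false : ∀ (l t : List Char),
    (l.foldl pyDzStep (t, false)).1 = t ++ l.dropWhile (· == '0') := by
  intro l
  induction l with
  | nil => intro t; simp
  | cons i rest ih =>
    intro t
    by_cases hi : i = '0'
    · subst hi
      have hs : pyDzStep (t, false) '0' = (t, false) := by simp [pyDzStep]
      rw [List.foldl_cons, hs, ih t]
      simp [List.dropWhile_cons]
    · have hb : (i == '0') = false := by simp [hi]
      have hs : pyDzStep (t, false) i = (t ++ [i], true) := by simp [pyDzStep, hi]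
      rw [List.foldl_cons, hs, dzFold_true rest (t ++ [i])]
      simp [List.dropWhile_cons, hb]

theorem pyDeleteZeros_eq (s : List Char) :
    pyDeleteZeros s =
      if (s.dropWhile (· == '0')).isEmpty then ['0'] else s.dropWhile (· == '0') := by
  unfold pyDeleteZeros
  have h := dzFold_false s []
  simp only [List.nil_append] at h
  simp [h, List.isEmpty_iff, List.length_eq_zero_iff]

-- A side: split_time's fold
theorem stFold_false : ∀ (l : List Char) (t1 t2 : List Char),
    l.foldl pyStStep (t1, t2, false) = (t1, t2 ++ l.filter (· != ':'), false) := by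
  intro l
  induction l with
  | nil => intro t1 t2; simp
  | cons i rest ih =>
    intro t1 t2
    by_cases hi : i = ':'
    · subst hi
      have hs : pyStStep (t1, t2, false) ':' = (t1, t2, false) := by simp [pyStStep]
      rw [List.foldl_cons, hs, ih t1 t2]
      simp [List.filter_cons]
    · have hb : (i != ':') = true := by simp [hi]
      have hs : pyStStep (t1, t2, false) i = (t1, t2 ++ [i], false) := by simp [pyStStep, hi]
      rw [List.foldl_cons, hs, ih t1 (t2 ++ [i])]
      simp [List.filter_cons, hb]

theorem stFold_true : ∀ (l : List Char) (t1 t2 : List Char),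
    l.foldl pyStStep (t1, t2, true)
    = (t1 ++ l.takeWhile (· != ':'),
       t2 ++ ((l.dropWhile (· != ':')).drop 1).filter (· != ':'),
       l.all (· != ':')) := by
  intro l
  induction l with
  | nil => intro t1 t2; simp
  | cons i rest ih =>
    intro t1 t2
    by_cases hi : i = ':'
    · subst hi
      have hs : pyStStep (t1, t2, true) ':' = (t1, t2, false) := by simp [pyStStep]
      rw [List.foldl_cons, hs, stFold_false rest t1 t2]
      simp [List.takeWhile_cons, List.dropWhile_cons]
    · have hb : (i != ':') = true := by simp [hi]
      have hs : pyStStep (t1, t2, true) i = (t1 ++ [i], t2, true) := by simp [pyStStep, hi]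
      rw [List.foldl_cons, hs, ih (t1 ++ [i]) t2]
      simp [List.takeWhile_cons, List.dropWhile_cons, hb]

theorem stFold_nil (l : List Char) :
    l.foldl pyStStep ([], [], true)
    = (l.takeWhile (· != ':'),
       ((l.dropWhile (· != ':')).drop 1).filter (· != ':'),
       l.all (· != ':')) := by
  simpa using stFold_true l [] []

-- the two head-token extractions agree
theorem head_token_eq (l : List Char) :
    (l.takeWhile (· != ' ')).takeWhile (· != '-')
      = l.takeWhile (fun ch => !(ch == ' ' || ch == '-')) := by
  induction l with
  | nil => simp
  | cons i rest ih =>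
    by_cases h1 : i = ' '
    · simp [List.takeWhile_cons, h1]
    · by_cases h2 : i = '-'
      · simp [List.takeWhile_cons, h1, h2]
      · simp [List.takeWhile_cons, h1, h2, ih]

-- ===== VERDICT (by name: the statement is the Claim_ definition above) =====
theorem start_time_spec : Claim_equal_start_time := by
  intro time_str _
  show start_time time_str = start_time_alt time_str
  unfold start_time start_time_alt pySplitTime
  rw [startLoop_true, List.nil_append]
  simp only [splitOnMax_head, head_token_eq, splitOn_eq, stFold_nil,
    List.headD_cons, List.drop_one, List.tail_cons, join_nil_eq_flatten,
    flatten_tailPieces, pyDeleteZeros_eq]
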